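-- pv_equiv track=rewrite | github.com/gustavscholin/advent_of_code | 2023/day_13/task_1.py | get_reflection_idx
-- ===== SOURCE A (Python) =====
-- def get_reflection_idx(lines):
--     for i in range(1, len(lines)):
--         if lines[i - 1] == lines[i]:
--             m = i + 1
--             n = i - 2
--             is_reflection = True
--             while n >= 0 and m < len(lines):
--                 if lines[n] != lines[m]:
--                     is_reflection = False
--                     break
--                 n -= 1
--                 m += 1
--             if is_reflection:
--                 return i
--     return 0
-- ===== SOURCE B (Python) =====
-- def get_reflection_idx(lines):
--     n = len(lines)
--     # Manacher's algorithm on even centers: d[i] = mirror radius at the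
--     # boundary before index i, computed in O(n) total comparisons by reusing
--     # the radius of the mirrored boundary inside the rightmost known mirror.
--     d = [0] * n
--     l, r = 0, -1
--     for i in range(1, n):
--         k = 0 if i > r else min(d[l + r - i + 1], r - i + 1)
--         while k < min(i, n - i) and lines[i - k - 1] == lines[i + k]:
--             k += 1
--         d[i] = k
--         if i + k - 1 > r:
--             l, r = i - k, i + k - 1
--     for i in range(1, n):
--         if d[i] == min(i, n - i):
--             return i
--     return 0
-- ===== Notes on version B (the rewrite author's own statement) =====
-- stated objective: alternative
-- what changed: A verifies each candidate split by its own outward pairwise scan; B runs Manacher's algorithm on even centers (computing every mirror radius in O(n) total comparisons by reusing the mirrored boundary's radius inside the rightmost known mirror) and then returns the first boundary whose radius reaches an edge.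
import Mathlib
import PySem

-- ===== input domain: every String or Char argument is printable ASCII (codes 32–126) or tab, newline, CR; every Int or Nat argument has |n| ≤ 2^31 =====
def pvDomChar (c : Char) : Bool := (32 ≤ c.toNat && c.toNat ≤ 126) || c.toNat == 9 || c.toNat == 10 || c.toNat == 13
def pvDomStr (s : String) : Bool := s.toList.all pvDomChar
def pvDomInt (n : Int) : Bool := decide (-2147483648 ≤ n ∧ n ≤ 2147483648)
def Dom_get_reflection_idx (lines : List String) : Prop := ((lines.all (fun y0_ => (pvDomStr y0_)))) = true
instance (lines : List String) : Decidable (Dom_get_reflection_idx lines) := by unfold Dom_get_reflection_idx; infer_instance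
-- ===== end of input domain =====

-- B replaces A's per-split outward comparison scan by Manacher's algorithm on
-- even centers (radii reused from the mirrored boundary), then picks the first
-- boundary whose radius reaches an edge (alternative algorithm; O(n) string
-- comparisons worst case instead of O(n^2)).

-- ===== PORT A =====
-- inner while loop; nn encodes n+1 (nn = 0 ↔ n < 0, the loop exit); indices
-- accessed only when 0 ≤ index < length, so pyGetD with default "" is exact
def pvA_inner (lines : List String) : Nat → Nat → Bool
  | 0, _ => true
  | n + 1, m =>
    if m < lines.length then
      if PySem.List.pyGetD lines (n : Int) "" ≠ PySem.List.pyGetD lines (m : Int) "" then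
        false
      else
        pvA_inner lines n (m + 1)
    else true

-- the for-loop with early return, over range(1, len(lines)) (Nat indices, all ≥ 1)
def pvA_loop (lines : List String) : List Nat → Int
  | [] => 0
  | i :: rest =>
    if PySem.List.pyGetD lines ((i : Int) - 1) "" = PySem.List.pyGetD lines (i : Int) "" then
      if pvA_inner lines (i - 1) (i + 1) then (i : Int) else pvA_loop lines rest
    else pvA_loop lines rest

def get_reflection_idx (lines : List String) : Int :=
  pvA_loop lines (List.range' 1 (lines.length - 1))

-- ===== PORT B =====
-- indices in B are accessed only when 0 ≤ index < length, so pyGetD "" is exact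
def pvGets (s : List String) (x : Int) : String := PySem.List.pyGetD s x ""

-- min(i, n - i), the edge cap on a radius at boundary i
def pvCap (s : List String) (i : Int) : Int := min i ((s.length : Int) - i)

-- while k < min(i, n - i) and lines[i - k - 1] == lines[i + k]: k += 1
def pvExt (s : List String) (i k : Int) : Int :=
  if h : k < pvCap s i ∧ pvGets s (i - k - 1) = pvGets s (i + k) then
    pvExt s i (k + 1)
  else k
termination_by (pvCap s i - k).toNat
decreasing_by have := h.1; omega

-- one iteration of the first for-loop, state (d, l, r)
def pvBStep (s : List String) (st : List Int × Int × Int) (i : Int) : List Int × Int × Int :=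
  let d := st.1
  let l := st.2.1
  let r := st.2.2
  let k0 : Int := if i > r then 0 else min (PySem.List.pyGetD d (l + r - i + 1) 0) (r - i + 1)
  let k := pvExt s i k0
  let d' := PySem.List.pySetD d i k   -- d[i] = k (1 ≤ i < len(d), in range)
  if i + k - 1 > r then (d', i - k, i + k - 1) else (d', l, r)

-- the second for-loop with early return
def pvBScan (s : List String) (d : List Int) : List Nat → Int
  | [] => 0
  | i :: rest =>
    if PySem.List.pyGetD d (i : Int) 0 = pvCap s (i : Int) then (i : Int)
    else pvBScan s d rest

def get_reflection_idx_alt (lines : List String) : Int :=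
  let st := (List.range' 1 (lines.length - 1)).foldl
      (fun st (i : Nat) => pvBStep lines st (i : Int)) (List.replicate lines.length 0, 0, -1)
  pvBScan lines st.1 (List.range' 1 (lines.length - 1))

-- ===== PRECONDITION & SPEC =====
def Spec_get_reflection_idx (lines : List String) (out : Int) : Prop := out = get_reflection_idx_alt lines
instance (lines : List String) (out : Int) : Decidable (Spec_get_reflection_idx lines out) := by unfold Spec_get_reflection_idx; infer_instance

-- ===== CLAIM (what is proved, stated in full; the proofs are below) =====
def Claim_equal_get_reflection_idx : Prop := ∀ (lines : List String), Dom_get_reflection_idx lines → Spec_get_reflection_idx lines (get_reflection_idx lines)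

-- ===== LEMMAS AND PROOFS =====

-- "the first k mirror pairs at boundary i all match"
def pvP (s : List String) (i k : Int) : Prop :=
  ∀ j : Int, 0 ≤ j → j < k → pvGets s (i - 1 - j) = pvGets s (i + j)

theorem pvExt_ge (s : List String) (i k : Int) : k ≤ pvExt s i k := by
  fun_induction pvExt s i k with
  | case1 k h ih => omega
  | case2 k h => omega

theorem pvExt_le (s : List String) (i k : Int) :
    k ≤ pvCap s i → pvExt s i k ≤ pvCap s i := by
  fun_induction pvExt s i k with
  | case1 k h ih => intro _; exact ih (by omega)
  | case2 k h => intro hk; exact hk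

theorem pvExt_P (s : List String) (i k : Int) :
    pvP s i k → pvP s i (pvExt s i k) := by
  fun_induction pvExt s i k with
  | case1 k h ih =>
    intro hP
    refine ih (fun j hj0 hjk1 => ?_)
    by_cases hjk : j < k
    · exact hP j hj0 hjk
    · have hjeq : j = k := by omega
      have e : i - 1 - k = i - k - 1 := by omega
      rw [hjeq, e]
      exact h.2
  | case2 k h => intro hP; exact hP

theorem pvExt_cap (s : List String) (i : Int) : pvExt s i (pvCap s i) = pvCap s i := by
  rw [pvExt.eq_def, dif_neg]
  intro h
  exact absurd h.1 (lt_irrefl _)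

theorem pvExt_shift (s : List String) (i : Int) :
    ∀ (m : Nat) (k : Int), 0 ≤ k → k + m ≤ pvCap s i → pvP s i (k + m) →
      pvExt s i k = pvExt s i (k + m) := by
  intro m
  induction m with
  | zero => intro k _ _ _; norm_num
  | succ m ih =>
    intro k hk0 hcap hP
    have hlt : k < pvCap s i := by push_cast at hcap; omega
    have hm : pvGets s (i - k - 1) = pvGets s (i + k) := by
      have := hP k hk0 (by push_cast; omega)
      have e : i - 1 - k = i - k - 1 := by omega
      rwa [e] at this
    have e2 : k + ((m : Int) + 1) = (k + 1) + m := by ring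
    conv_lhs => rw [pvExt.eq_def]
    rw [dif_pos ⟨hlt, hm⟩]
    push_cast
    rw [e2]
    exact ih (k + 1) (by omega) (by push_cast at hcap; omega)
      (by have : k + ((m : Nat) + 1 : Nat) = k + 1 + (m : Int) := by push_cast; ring
          rwa [this] at hP)

theorem pvExt_zero_eq (s : List String) (i k0 : Int) (h0 : 0 ≤ k0) (hc : k0 ≤ pvCap s i)
    (hP : pvP s i k0) : pvExt s i 0 = pvExt s i k0 := by
  have e : (0 : Int) + (k0.toNat : Int) = k0 := by omega
  have := pvExt_shift s i k0.toNat 0 le_rfl (by rw [e]; exact hc) (by rw [e]; exact hP)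
  rwa [e] at this

-- symmetry inside a known mirror: x and 2c-1-x hold equal lines
theorem pvSym (s : List String) (c rad : Int) (h : pvP s c rad) :
    ∀ x : Int, c - rad ≤ x → x ≤ c + rad - 1 → pvGets s x = pvGets s (2 * c - 1 - x) := by
  intro x hx1 hx2
  by_cases hc : c ≤ x
  · have := h (x - c) (by omega) (by omega)
    have e1 : c - 1 - (x - c) = 2 * c - 1 - x := by ring
    have e2 : c + (x - c) = x := by ring
    rw [e1, e2] at this
    exact this.symm
  · have := h (c - 1 - x) (by omega) (by omega)
    have e1 : c - 1 - (c - 1 - x) = x := by ring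
    have e2 : c + (c - 1 - x) = 2 * c - 1 - x := by ring
    rw [e1, e2] at this
    exact this

-- pyGetD after pySetD, Int indices
theorem pvGetD_set (d : List Int) (i x v : Int) (hi0 : 0 ≤ i) (hil : i < (d.length : Int))
    (hx : 0 ≤ x) :
    PySem.List.pyGetD (PySem.List.pySetD d i v) x 0
      = if x = i then v else PySem.List.pyGetD d x 0 := by
  have h := PySem.List.pyGetD_pySetD_natCast d i.toNat x.toNat v 0 (by omega)
  rw [Int.toNat_of_nonneg hi0, Int.toNat_of_nonneg hx] at h
  rw [h]
  split_ifs with h1 h2 h2 <;> first | rfl | (exfalso; omega)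

-- loop invariant of the first for-loop, before processing boundary i
def pvInv (s : List String) (i : Int) (st : List Int × Int × Int) : Prop :=
  st.1.length = s.length ∧
  (∀ x : Int, 1 ≤ x → x < i → PySem.List.pyGetD st.1 x 0 = pvExt s x 0) ∧
  ∃ c rad : Int, 0 ≤ rad ∧ rad ≤ c ∧ c ≤ i - 1 ∧ rad ≤ (s.length : Int) - c ∧
    st.2.1 = c - rad ∧ st.2.2 = c + rad - 1 ∧ pvP s c rad

theorem pvStep_inv (s : List String) (i : Int) (st : List Int × Int × Int)
    (h1 : 1 ≤ i) (h2 : i ≤ (s.length : Int) - 1) (hinv : pvInv s i st) :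
    pvInv s (i + 1) (pvBStep s st i) := by
  obtain ⟨hlen, hd, c, rad, hrad0, hrc, hci, hrn, hl, hr, hP⟩ := hinv
  have hcap : pvCap s i = min i ((s.length : Int) - i) := rfl
  have hcap0 : (0 : Int) ≤ pvCap s i := by rw [hcap]; omega
  set k0 : Int :=
    if i > st.2.2 then 0
    else min (PySem.List.pyGetD st.1 (st.2.1 + st.2.2 - i + 1) 0) (st.2.2 - i + 1)
    with hk0def
  have K : 0 ≤ k0 ∧ k0 ≤ pvCap s i ∧ pvP s i k0 := by
    by_cases hir : i > st.2.2
    · rw [hk0def, if_pos hir]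
      exact ⟨le_rfl, hcap0, fun j hj0 hjk => absurd hjk (by omega)⟩
    · have hir' : i ≤ c + rad - 1 := by rw [hr] at hir; omega
      have hmir_eq : st.2.1 + st.2.2 - i + 1 = 2 * c - i := by rw [hl, hr]; ring
      have hm1 : 1 ≤ 2 * c - i := by omega
      have hm2 : 2 * c - i < i := by omega
      have hdm := hd (2 * c - i) hm1 hm2
      have hcapm : pvCap s (2 * c - i) = min (2 * c - i) ((s.length : Int) - (2 * c - i)) := rfl
      have hdm0 : (0 : Int) ≤ pvExt s (2 * c - i) 0 := pvExt_ge s (2 * c - i) 0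
      have hdmle : pvExt s (2 * c - i) 0 ≤ pvCap s (2 * c - i) :=
        pvExt_le s (2 * c - i) 0 (by rw [hcapm]; omega)
      have hPm : pvP s (2 * c - i) (pvExt s (2 * c - i) 0) :=
        pvExt_P s (2 * c - i) 0 (fun j hj0 hjk => absurd hjk (by omega))
      rw [hk0def, if_neg hir, hmir_eq, hdm, hr]
      rw [hcapm] at hdmle
      refine ⟨by omega, by rw [hcap]; omega, ?_⟩
      intro j hj0 hjk
      have hjdm : j < pvExt s (2 * c - i) 0 := by omega
      have hjr : j < c + rad - i := by omega
      have s1 := pvSym s c rad hP (i + j) (by omega) (by omega)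
      have s2 := pvSym s c rad hP (i - 1 - j) (by omega) (by omega)
      have s3 := hPm j hj0 hjdm
      have e1 : 2 * c - 1 - (i + j) = 2 * c - i - 1 - j := by ring
      have e2 : 2 * c - 1 - (i - 1 - j) = 2 * c - i + j := by ring
      rw [e1] at s1
      rw [e2] at s2
      exact s2.trans (s3.symm.trans s1.symm)
  have hE : pvExt s i k0 = pvExt s i 0 := (pvExt_zero_eq s i k0 K.1 K.2.1 K.2.2).symm
  have hge : k0 ≤ pvExt s i k0 := pvExt_ge s i k0
  have hle : pvExt s i k0 ≤ pvCap s i := pvExt_le s i k0 K.2.1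
  have hPk : pvP s i (pvExt s i k0) := by
    rw [hE]
    exact pvExt_P s i 0 (fun j hj0 hjk => absurd hjk (by omega))
  have hdlen : (i : Int) < (st.1.length : Int) := by omega
  have hdinv : ∀ x : Int, 1 ≤ x → x < i + 1 →
      PySem.List.pyGetD (PySem.List.pySetD st.1 i (pvExt s i k0)) x 0 = pvExt s x 0 := by
    intro x hx1 hxlt
    rw [pvGetD_set st.1 i x _ (by omega) hdlen (by omega)]
    by_cases hxe : x = i
    · rw [if_pos hxe, hxe, hE]
    · rw [if_neg hxe]
      exact hd x hx1 (by omega)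
  show pvInv s (i + 1)
    (if i + pvExt s i k0 - 1 > st.2.2
      then (PySem.List.pySetD st.1 i (pvExt s i k0), i - pvExt s i k0, i + pvExt s i k0 - 1)
      else (PySem.List.pySetD st.1 i (pvExt s i k0), st.2.1, st.2.2))
  rw [hcap] at hle
  by_cases hupd : i + pvExt s i k0 - 1 > st.2.2
  · rw [if_pos hupd]
    refine ⟨by rw [PySem.List.length_pySetD]; exact hlen, hdinv, i, pvExt s i k0,
      by omega, by omega, by omega, by omega, rfl, rfl, hPk⟩
  · rw [if_neg hupd]
    exact ⟨by rw [PySem.List.length_pySetD]; exact hlen, hdinv, c, rad,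
      hrad0, hrc, by omega, hrn, hl, hr, hP⟩

theorem pvFold_inv (s : List String) :
    ∀ (len a : Nat) (st : List Int × Int × Int), 1 ≤ a →
      ((a : Int) + len ≤ (s.length : Int)) → pvInv s a st →
      pvInv s ((a : Int) + len)
        ((List.range' a len).foldl (fun st (i : Nat) => pvBStep s st (i : Int)) st) := by
  intro len
  induction len with
  | zero => intro a st _ _ h; simpa using h
  | succ len ih =>
    intro a st ha hbound hinv
    rw [List.range'_succ, List.foldl_cons]
    have hstep := pvStep_inv s a st (by exact_mod_cast ha) (by push_cast at hbound ⊢; omega) hinv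
    have := ih (a + 1) (pvBStep s st a) (by omega)
      (by push_cast at hbound ⊢; omega)
      (by have e : ((a : Int) + 1) = ((a + 1 : Nat) : Int) := by push_cast; ring
          rwa [e] at hstep)
    have e2 : ((a + 1 : Nat) : Int) + (len : Int) = (a : Int) + ((len + 1 : Nat) : Int) := by
      push_cast; ring
    rwa [e2] at this

-- boolean helpers about A's test (from the literal port)
theorem pv_ite_and (a b : String) (c : Bool) :
    (if a ≠ b then false else c) = ((a == b) && c) := by
  by_cases h : a = b <;> simp [h]

theorem pv_all_congr {α : Type} (l : List α) (p q : α → Bool)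
    (h : ∀ a ∈ l, p a = q a) : l.all p = l.all q := by
  induction l with
  | nil => rfl
  | cons a l ih =>
    simp only [List.all_cons, h a (by simp), ih (fun b hb => h b (by simp [hb]))]

-- A's inner while loop computes the "all pairs up to the nearer edge agree" test
theorem pv_inner_all (lines : List String) :
    ∀ (nn m : Nat), nn ≤ lines.length →
      pvA_inner lines nn m
        = (List.range (min nn (lines.length - m))).all
            (fun j => lines.getD (nn - 1 - j) "" == lines.getD (m + j) "") := by
  intro nn
  induction nn with
  | zero => intro m _; simp [pvA_inner]
  | succ n ih =>
    intro m h
    by_cases hm : m < lines.length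
    · have hmin : min (n + 1) (lines.length - m) = min n (lines.length - (m + 1)) + 1 := by
        omega
      rw [hmin, List.range_succ_eq_map]
      simp only [List.all_cons, List.all_map]
      rw [pv_all_congr _ _
            (fun j => lines.getD (n - 1 - j) "" == lines.getD (m + 1 + j) "")
            (fun j _ => by
              simp only [Function.comp_apply, Nat.succ_eq_add_one]
              have e1 : n + 1 - 1 - (j + 1) = n - 1 - j := by omega
              have e2 : m + (j + 1) = m + 1 + j := by omega
              rw [e1, e2])]
      rw [← ih (m + 1) (by omega)]
      have e3 : n + 1 - 1 - 0 = n := by omega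
      have e4 : m + 0 = m := by omega
      rw [e3, e4]
      conv_lhs => rw [pvA_inner]
      rw [if_pos hm, PySem.List.pyGetD_natCast, PySem.List.pyGetD_natCast, pv_ite_and]
    · have h0 : lines.length - m = 0 := by omega
      simp [pvA_inner, hm, h0]

-- A's candidate test (adjacent pair, then the while loop), as a Nat-indexed all
theorem pv_cond_eq (lines : List String) (i : Nat) (h1 : 1 ≤ i) (h2 : i < lines.length) :
    ((PySem.List.pyGetD lines ((i : Int) - 1) "" == PySem.List.pyGetD lines (i : Int) "")
        && pvA_inner lines (i - 1) (i + 1))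
      = (List.range (min i (lines.length - i))).all
          (fun j => lines.getD (i - 1 - j) "" == lines.getD (i + j) "") := by
  have hmin : min i (lines.length - i) = min (i - 1) (lines.length - (i + 1)) + 1 := by omega
  rw [hmin, List.range_succ_eq_map]
  simp only [List.all_cons, List.all_map]
  rw [pv_all_congr _ _
        (fun j => lines.getD (i - 1 - 1 - j) "" == lines.getD (i + 1 + j) "")
        (fun j _ => by
          simp only [Function.comp_apply, Nat.succ_eq_add_one]
          have e1 : i - 1 - (j + 1) = i - 1 - 1 - j := by omega
          have e2 : i + (j + 1) = i + 1 + j := by omega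
          rw [e1, e2])]
  rw [← pv_inner_all lines (i - 1) (i + 1) (by omega)]
  have e3 : i - 1 - 0 = i - 1 := by omega
  have e4 : i + 0 = i := by omega
  have e5 : (i : Int) - 1 = ((i - 1 : Nat) : Int) := by omega
  rw [e3, e4, e5, PySem.List.pyGetD_natCast, PySem.List.pyGetD_natCast]

-- the Nat-indexed all test is pvP at the cap
theorem pvAll_iff_P (s : List String) (i : Nat) (h1 : 1 ≤ i) (h2 : i < s.length) :
    ((List.range (min i (s.length - i))).all
        (fun j => s.getD (i - 1 - j) "" == s.getD (i + j) "") = true)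
      ↔ pvP s (i : Int) (pvCap s (i : Int)) := by
  have ecap : ((min i (s.length - i) : Nat) : Int) = pvCap s (i : Int) := by
    have : pvCap s (i : Int) = min (i : Int) ((s.length : Int) - (i : Int)) := rfl
    rw [this]; omega
  rw [List.all_eq_true]
  constructor
  · intro hall j hj0 hjc
    have hjn : j.toNat < min i (s.length - i) := by omega
    have := hall j.toNat (List.mem_range.mpr hjn)
    rw [beq_iff_eq] at this
    have hji : j.toNat < i := by omega
    have e1 : (i : Int) - 1 - j = ((i - 1 - j.toNat : Nat) : Int) := by omega
    have e2 : (i : Int) + j = ((i + j.toNat : Nat) : Int) := by omega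
    show pvGets s ((i : Int) - 1 - j) = pvGets s ((i : Int) + j)
    rw [pvGets, pvGets, e1, e2, PySem.List.pyGetD_natCast, PySem.List.pyGetD_natCast]
    exact this
  · intro hP j hj
    have hjn := List.mem_range.mp hj
    rw [beq_iff_eq]
    have := hP (j : Int) (by omega) (by omega)
    have hji : j < i := by omega
    have e1 : (i : Int) - 1 - j = ((i - 1 - j : Nat) : Int) := by omega
    have e2 : (i : Int) + j = ((i + j : Nat) : Int) := by omega
    rw [pvGets, pvGets, e1, e2, PySem.List.pyGetD_natCast, PySem.List.pyGetD_natCast] at this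
    exact this

-- the radius reaches the cap iff all pairs up to the cap match
theorem pvExt0_iff_P (s : List String) (i : Int) (h0 : 0 ≤ pvCap s i) :
    pvExt s i 0 = pvCap s i ↔ pvP s i (pvCap s i) := by
  constructor
  · intro h
    have := pvExt_P s i 0 (fun j hj0 hjk => absurd hjk (by omega))
    rwa [h] at this
  · intro hP
    rw [pvExt_zero_eq s i (pvCap s i) h0 le_rfl hP, pvExt_cap]

-- A's loop and B's scan agree when d holds the true radii
theorem pvScan_eq (s : List String) (d : List Int)
    (hd : ∀ x : Int, 1 ≤ x → x < (s.length : Int) → PySem.List.pyGetD d x 0 = pvExt s x 0) :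
    ∀ l : List Nat, (∀ i ∈ l, 1 ≤ i ∧ i < s.length) →
      pvA_loop s l = pvBScan s d l := by
  intro l
  induction l with
  | nil => intro _; rfl
  | cons i rest ih =>
    intro h
    have hi := h i (by simp)
    have hrest : ∀ j ∈ rest, 1 ≤ j ∧ j < s.length := fun j hj => h j (by simp [hj])
    have hcap0 : (0 : Int) ≤ pvCap s (i : Int) := by
      have : pvCap s (i : Int) = min (i : Int) ((s.length : Int) - (i : Int)) := rfl
      rw [this]; omega
    have hAcond :
        ((PySem.List.pyGetD s ((i : Int) - 1) "" == PySem.List.pyGetD s (i : Int) "")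
            && pvA_inner s (i - 1) (i + 1))
          = decide (pvExt s (i : Int) 0 = pvCap s (i : Int)) := by
      rw [pv_cond_eq s i hi.1 hi.2]
      by_cases hds : pvExt s (i : Int) 0 = pvCap s (i : Int)
      · simp only [hds, decide_true]
        exact (pvAll_iff_P s i hi.1 hi.2).mpr ((pvExt0_iff_P s (i : Int) hcap0).mp hds)
      · simp only [hds, decide_false]
        rw [← Bool.not_eq_true]
        intro hall
        exact hds ((pvExt0_iff_P s (i : Int) hcap0).mpr ((pvAll_iff_P s i hi.1 hi.2).mp hall))
    rw [pvA_loop, pvBScan, hd (i : Int) (by omega) (by omega), ih hrest]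
    by_cases hds : pvExt s (i : Int) 0 = pvCap s (i : Int)
    · rw [if_pos hds]
      have htrue : ((PySem.List.pyGetD s ((i : Int) - 1) "" == PySem.List.pyGetD s (i : Int) "")
          && pvA_inner s (i - 1) (i + 1)) = true := by
        rw [hAcond]; exact decide_eq_true hds
      rw [Bool.and_eq_true, beq_iff_eq] at htrue
      rw [if_pos htrue.1, if_pos htrue.2]
    · rw [if_neg hds]
      have hfalse : ((PySem.List.pyGetD s ((i : Int) - 1) "" == PySem.List.pyGetD s (i : Int) "")
          && pvA_inner s (i - 1) (i + 1)) = false := by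
        rw [hAcond]; exact decide_eq_false hds
      by_cases ha1 : PySem.List.pyGetD s ((i : Int) - 1) "" = PySem.List.pyGetD s (i : Int) ""
      · rw [if_pos ha1]
        have hinner : pvA_inner s (i - 1) (i + 1) = false := by
          rw [ha1] at hfalse
          simpa using hfalse
        rw [hinner, if_neg (by simp)]
      · rw [if_neg ha1]

-- ===== VERDICT (by name: the statement is the Claim_ definition above) =====
theorem get_reflection_idx_spec : Claim_equal_get_reflection_idx := by
  intro lines _
  unfold Spec_get_reflection_idx get_reflection_idx get_reflection_idx_alt
  by_cases hn : lines.length = 0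
  · rw [hn]; rfl
  · have hn1 : 1 ≤ lines.length := by omega
    have hinit : pvInv lines 1 (List.replicate lines.length 0, 0, -1) := by
      refine ⟨by simp, fun x hx1 hxlt => absurd hxlt (by omega), 0, 0,
        le_rfl, le_rfl, by omega, by omega, rfl, rfl,
        fun j hj0 hjk => absurd hjk (by omega)⟩
    have hfold := pvFold_inv lines (lines.length - 1) 1
      (List.replicate lines.length 0, 0, -1) le_rfl (by push_cast; omega) hinit
    have e : ((1 : Nat) : Int) + ((lines.length - 1 : Nat) : Int) = (lines.length : Int) := by
      omega
    rw [e] at hfold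
    exact pvScan_eq lines _ hfold.2.1 _ (fun i hi => by
      rcases List.mem_range'_1.mp hi with ⟨hk, hk2⟩
      omega)
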